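-- pv_equiv track=rewrite | github.com/huggingface/OBELICS | build_obelics/13_final_processing.py | final_cleaning_node_level
-- ===== SOURCE A (Python) =====
-- def final_cleaning_node_level(texts, images, metadata):
--     new_texts = []
--     new_images = []
--     new_metadata = []
--
--     previous_is_text = False
--     for text, image, meta in zip(texts, images, metadata):
--         if text is not None:
--             assert image is None
--             assert meta is None
--             if text == "":
--                 continue
--             if previous_is_text:
--                 new_texts[-1] = new_texts[-1] + "\n\n" + text
--             else:
--                 new_texts.append(text)
--                 new_images.append(None)
--                 new_metadata.append(None)
--                 previous_is_text = True
--         elif image is not None: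
--             assert (text is None) and (meta is not None)
--             new_texts.append(None)
--             new_images.append(image)
--             new_metadata.append(meta)
--             previous_is_text = False
--         elif meta is not None:
--             raise ValueError("metadata cannot be != None if text and image are None")
--
--     assert len(new_texts) == len(new_images) == len(new_metadata)
--     return new_texts, new_images, new_metadata
-- ===== SOURCE B (Python) =====
-- def final_cleaning_node_level(texts, images, metadata):
--     # Pass 1: validate each node and reduce the stream to significant events:
--     # a non-empty text string, or an (image, meta) pair. Empty texts and
--     # fully-None nodes vanish here, so they cannot break a text run.
--     events = []
--     for text, image, meta in zip(texts, images, metadata):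
--         if text is not None:
--             assert image is None
--             assert meta is None
--             if text != "":
--                 events.append(text)
--         elif image is not None:
--             assert meta is not None
--             events.append((image, meta))
--         elif meta is not None:
--             raise ValueError("metadata cannot be != None if text and image are None")
--
--     # Pass 2: group consecutive text events into one joined node.
--     new_texts, new_images, new_metadata = [], [], []
--     i, n = 0, len(events)
--     while i < n:
--         if isinstance(events[i], str):
--             j = i
--             while j < n and isinstance(events[j], str):
--                 j += 1
--             new_texts.append("\n\n".join(events[i:j]))
--             new_images.append(None)
--             new_metadata.append(None)
--             i = j
--         else:
--             image, meta = events[i]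
--             new_texts.append(None)
--             new_images.append(image)
--             new_metadata.append(meta)
--             i += 1
--     return new_texts, new_images, new_metadata
-- ===== Notes on version B (the rewrite author's own statement) =====
-- stated objective: alternative
-- what changed: Replaces A's single loop with a mutable previous_is_text flag and in-place new_texts[-1] concatenation by a two-phase pipeline: first reduce the stream to significant events (non-empty texts, image nodes), then group consecutive text events and emit each run as one join, with no flag and no in-place mutation.
import Mathlib
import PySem

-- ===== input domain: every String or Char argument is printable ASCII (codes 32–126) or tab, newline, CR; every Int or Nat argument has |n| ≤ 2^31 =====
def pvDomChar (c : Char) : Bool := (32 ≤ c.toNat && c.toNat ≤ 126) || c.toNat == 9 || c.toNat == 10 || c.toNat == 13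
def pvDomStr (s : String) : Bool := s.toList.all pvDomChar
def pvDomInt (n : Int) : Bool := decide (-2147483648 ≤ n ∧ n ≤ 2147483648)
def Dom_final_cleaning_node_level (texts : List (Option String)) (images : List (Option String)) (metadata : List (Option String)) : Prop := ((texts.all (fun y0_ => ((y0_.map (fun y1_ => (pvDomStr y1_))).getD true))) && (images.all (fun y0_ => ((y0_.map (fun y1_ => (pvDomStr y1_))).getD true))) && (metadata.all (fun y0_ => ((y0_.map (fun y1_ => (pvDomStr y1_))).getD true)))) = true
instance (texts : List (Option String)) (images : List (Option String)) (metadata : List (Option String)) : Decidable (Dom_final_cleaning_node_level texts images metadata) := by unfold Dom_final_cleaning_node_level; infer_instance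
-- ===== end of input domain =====

-- B replaces A's single loop with a previous_is_text flag and in-place last-element
-- concatenation by a two-phase pipeline (extract significant events, then group
-- consecutive text events into one joined node); return values proved equal on Pre_.

-- ===== PORT A =====
-- Python's `new_texts[-1] = new_texts[-1] + "\n\n" + text`; under the loop's flag
-- invariant the last slot holds `some _` (the `getD ""` default is unreachable there).
def pvUpdateLast : List (Option String) → String → List (Option String)
  | [], _ => []
  | [x], s => [some ((x.getD "") ++ "\n\n" ++ s)]
  | x :: y :: rest, s => x :: pvUpdateLast (y :: rest) s

def fcnA_loop : List (Option String × Option String × Option String) →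
    List (Option String) → List (Option String) → List (Option String) → Bool →
    List (Option String) × List (Option String) × List (Option String)
  | [], nT, nI, nM, _ => (nT, nI, nM)
  | (t, i, m) :: rest, nT, nI, nM, prev =>
    match t with
    | some s =>
        -- Python asserts image is None and meta is None here; failing inputs are outside Pre_
        if s = "" then fcnA_loop rest nT nI nM prev
        else if prev then fcnA_loop rest (pvUpdateLast nT s) nI nM prev
        else fcnA_loop rest (nT ++ [some s]) (nI ++ [none]) (nM ++ [none]) true
    | none =>
      match i with
      | some img =>
          -- Python asserts meta is not None here; failing inputs are outside Pre_
          fcnA_loop rest (nT ++ [none]) (nI ++ [some img]) (nM ++ [m]) false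
      | none =>
          -- meta ≠ None here raises ValueError in Python (outside Pre_); all-None is skipped
          fcnA_loop rest nT nI nM prev

def final_cleaning_node_level (texts : List (Option String)) (images : List (Option String)) (metadata : List (Option String)) : List (Option String) × List (Option String) × List (Option String) :=
  fcnA_loop (texts.zip (images.zip metadata)) [] [] [] false

-- ===== PORT B =====
-- a significant event of Source B's first pass: a non-empty text, or an (image, meta) node
inductive PvEv where
  | txt : String → PvEv
  | img : String → Option String → PvEv
deriving DecidableEq, Repr

-- Source B pass 1: validation + event extraction (raising inputs are outside Pre_)
def pvEvents : List (Option String × Option String × Option String) → List PvEv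
  | [] => []
  | (t, i, m) :: rest =>
    match t with
    | some s => if s = "" then pvEvents rest else PvEv.txt s :: pvEvents rest
    | none =>
      match i with
      | some a => PvEv.img a m :: pvEvents rest
      | none => pvEvents rest

-- Source B's inner `while j < n and isinstance(events[j], str): j += 1` + `events[i:j]`:
-- the leading run of text events, and the remainder
def pvSpan : List PvEv → List String × List PvEv
  | [] => ([], [])
  | PvEv.txt s :: rest => let p := pvSpan rest; (s :: p.1, p.2)
  | PvEv.img a b :: rest => ([], PvEv.img a b :: rest)

lemma pvSpan_length : ∀ evs : List PvEv, (pvSpan evs).2.length ≤ evs.length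
  | [] => le_refl _
  | PvEv.txt _ :: rest => le_trans (pvSpan_length rest) (Nat.le_succ _)
  | PvEv.img _ _ :: _ => le_refl _

-- `"\n\n".join(run)`
def pvJoin : List String → String
  | [] => ""
  | [s] => s
  | s :: t :: rest => s ++ "\n\n" ++ pvJoin (t :: rest)

-- Source B pass 2: the outer while loop over events
def pvGroup : List PvEv → List (Option String) × List (Option String) × List (Option String)
  | [] => ([], [], [])
  | PvEv.txt s :: rest =>
      let p := pvSpan rest
      let g := pvGroup p.2
      (some (pvJoin (s :: p.1)) :: g.1, none :: g.2.1, none :: g.2.2)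
  | PvEv.img a b :: rest =>
      let g := pvGroup rest
      (none :: g.1, some a :: g.2.1, b :: g.2.2)
termination_by evs => evs.length
decreasing_by
  · simpa [List.length_cons] using Nat.lt_succ_of_le (pvSpan_length rest)
  · simp

def final_cleaning_node_level_alt (texts : List (Option String)) (images : List (Option String)) (metadata : List (Option String)) : List (Option String) × List (Option String) × List (Option String) :=
  pvGroup (pvEvents (texts.zip (images.zip metadata)))

-- ===== PRECONDITION & SPEC =====
-- Pre_ excludes exactly the inputs on which the Python A raises: a node with a text
-- plus an image or metadata (AssertionError), an image without metadata (AssertionError),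
-- and metadata alone (ValueError).
def Pre_final_cleaning_node_level (texts : List (Option String)) (images : List (Option String)) (metadata : List (Option String)) : Prop :=
  ∀ r ∈ texts.zip (images.zip metadata),
    (r.1 ≠ none → r.2.1 = none ∧ r.2.2 = none) ∧
    (r.1 = none → (r.2.1 ≠ none ↔ r.2.2 ≠ none))
instance (texts : List (Option String)) (images : List (Option String)) (metadata : List (Option String)) : Decidable (Pre_final_cleaning_node_level texts images metadata) := by unfold Pre_final_cleaning_node_level; infer_instance

def pvWitness_final_cleaning_node_level : List (Option String) × List (Option String) × List (Option String) :=
  ([some "a", some "", none, some "b"], [none, none, some "i", none], [none, none, some "m", none])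

def Spec_final_cleaning_node_level (texts : List (Option String)) (images : List (Option String)) (metadata : List (Option String)) (out : List (Option String) × List (Option String) × List (Option String)) : Prop := out = final_cleaning_node_level_alt texts images metadata
instance (texts : List (Option String)) (images : List (Option String)) (metadata : List (Option String)) (out : List (Option String) × List (Option String) × List (Option String)) : Decidable (Spec_final_cleaning_node_level texts images metadata out) := by unfold Spec_final_cleaning_node_level; infer_instance

-- ===== CLAIM (what is proved, stated in full; the proofs are below) =====
def Claim_equal_final_cleaning_node_level : Prop := ∀ (texts : List (Option String)) (images : List (Option String)) (metadata : List (Option String)), Dom_final_cleaning_node_level texts images metadata → Pre_final_cleaning_node_level texts images metadata → Spec_final_cleaning_node_level texts images metadata (final_cleaning_node_level texts images metadata)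

-- ===== LEMMAS AND PROOFS =====
lemma pvUpdateLast_append : ∀ (nT : List (Option String)) (acc s : String),
    pvUpdateLast (nT ++ [some acc]) s = nT ++ [some (acc ++ "\n\n" ++ s)]
  | [], acc, s => by simp [pvUpdateLast]
  | x :: [], acc, s => by simp [pvUpdateLast]
  | x :: y :: ys, acc, s => by
      simpa [pvUpdateLast] using pvUpdateLast_append (y :: ys) acc s

lemma pvJoin_merge (a b : String) (l : List String) :
    pvJoin ((a ++ "\n\n" ++ b) :: l) = a ++ "\n\n" ++ pvJoin (b :: l) := by
  cases l with
  | nil => rfl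
  | cons c rest =>
      show (a ++ "\n\n" ++ b) ++ "\n\n" ++ pvJoin (c :: rest)
         = a ++ "\n\n" ++ (b ++ "\n\n" ++ pvJoin (c :: rest))
      simp [String.append_assoc]

lemma fcnA_fcnB (rows : List (Option String × Option String × Option String)) :
    ∀ nT nI nM : List (Option String),
    (fcnA_loop rows nT nI nM false =
      (nT ++ (pvGroup (pvEvents rows)).1,
       nI ++ (pvGroup (pvEvents rows)).2.1,
       nM ++ (pvGroup (pvEvents rows)).2.2)) ∧
    (∀ acc : String,
      fcnA_loop rows (nT ++ [some acc]) (nI ++ [none]) (nM ++ [none]) true =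
        (nT ++ some (pvJoin (acc :: (pvSpan (pvEvents rows)).1)) :: (pvGroup (pvSpan (pvEvents rows)).2).1,
         nI ++ none :: (pvGroup (pvSpan (pvEvents rows)).2).2.1,
         nM ++ none :: (pvGroup (pvSpan (pvEvents rows)).2).2.2)) := by
  induction rows with
  | nil => intro nT nI nM; exact ⟨by simp [fcnA_loop, pvEvents, pvGroup],
      fun acc => by simp [fcnA_loop, pvEvents, pvSpan, pvGroup, pvJoin]⟩
  | cons r rest ih =>
      obtain ⟨t, i, m⟩ := r
      intro nT nI nM
      cases t with
      | some s =>
          by_cases hs : s = ""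
          · subst hs
            refine ⟨?_, fun acc => ?_⟩
            · simpa [fcnA_loop, pvEvents] using (ih nT nI nM).1
            · simpa [fcnA_loop, pvEvents] using (ih nT nI nM).2 acc
          · refine ⟨?_, fun acc => ?_⟩
            · -- first text of a run: A appends and sets the flag; B opens a group
              rw [show fcnA_loop ((some s, i, m) :: rest) nT nI nM false
                    = fcnA_loop rest (nT ++ [some s]) (nI ++ [none]) (nM ++ [none]) true
                  from by simp [fcnA_loop, hs]]
              rw [(ih nT nI nM).2 s]
              simp [pvEvents, hs, pvGroup]
            · -- continuing a run: A concatenates into the last slot; B extends the span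
              rw [show fcnA_loop ((some s, i, m) :: rest) (nT ++ [some acc]) (nI ++ [none]) (nM ++ [none]) true
                    = fcnA_loop rest (pvUpdateLast (nT ++ [some acc]) s) (nI ++ [none]) (nM ++ [none]) true
                  from by simp [fcnA_loop, hs]]
              rw [pvUpdateLast_append, (ih nT nI nM).2 (acc ++ "\n\n" ++ s)]
              simp [pvEvents, hs, pvSpan, pvJoin_merge, pvJoin]
      | none =>
          cases i with
          | some a =>
              refine ⟨?_, fun acc => ?_⟩
              · rw [show fcnA_loop ((none, some a, m) :: rest) nT nI nM false
                      = fcnA_loop rest (nT ++ [none]) (nI ++ [some a]) (nM ++ [m]) false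
                    from by simp [fcnA_loop]]
                rw [(ih (nT ++ [none]) (nI ++ [some a]) (nM ++ [m])).1]
                simp [pvEvents, pvGroup]
              · -- an image node ends the current text run
                rw [show fcnA_loop ((none, some a, m) :: rest) (nT ++ [some acc]) (nI ++ [none]) (nM ++ [none]) true
                      = fcnA_loop rest ((nT ++ [some acc]) ++ [none]) ((nI ++ [none]) ++ [some a]) ((nM ++ [none]) ++ [m]) false
                    from by simp [fcnA_loop]]
                rw [(ih ((nT ++ [some acc]) ++ [none]) ((nI ++ [none]) ++ [some a]) ((nM ++ [none]) ++ [m])).1]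
                simp [pvEvents, pvSpan, pvGroup, pvJoin]
          | none =>
              refine ⟨?_, fun acc => ?_⟩
              · simpa [fcnA_loop, pvEvents] using (ih nT nI nM).1
              · simpa [fcnA_loop, pvEvents] using (ih nT nI nM).2 acc

-- ===== VERDICT (by name: the statement is the Claim_ definition above) =====
theorem final_cleaning_node_level_spec : Claim_equal_final_cleaning_node_level := by
  intro texts images metadata _ _
  unfold Spec_final_cleaning_node_level final_cleaning_node_level final_cleaning_node_level_alt
  simpa using (fcnA_fcnB (texts.zip (images.zip metadata)) [] [] []).1
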